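-- pv_equiv track=rewrite | github.com/nrhinela/photocat | src/zoltag/auth/dependencies.py | _expand_permissions
-- ===== SOURCE A (Python) =====
-- PERMISSION_IMPLICATIONS: dict[str, set[str]] = {
--     # Alias -> canonical (broad convenience aliases)
--     "assets.read": {"image.view"},
--     "assets.write": {"image.rate", "image.tag", "image.note.edit", "image.variant.manage"},
--     # Canonical -> alias (read-only compatibility for legacy roles/UI checks)
--     "image.view": {"assets.read"},
-- }
--
-- def _expand_permissions(allowed: set[str], denied: set[str]) -> set[str]:
--     expanded = set(allowed)
--     changed = True
--     while changed:
--         changed = False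
--         for permission_key in list(expanded):
--             implied = PERMISSION_IMPLICATIONS.get(permission_key) or set()
--             for implied_key in implied:
--                 if implied_key in denied or implied_key in expanded:
--                     continue
--                 expanded.add(implied_key)
--                 changed = True
--     return expanded - denied
-- ===== SOURCE B (Python) =====
-- PERMISSION_IMPLICATIONS: dict[str, set[str]] = {
--     "assets.read": {"image.view"},
--     "assets.write": {"image.rate", "image.tag", "image.note.edit", "image.variant.manage"},
--     "image.view": {"assets.read"},
-- }
--
-- def _expand_permissions(allowed: set[str], denied: set[str]) -> set[str]:
--     # BFS/worklist: every key is taken off the queue once; implied keys that are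
--     # neither denied nor already present are added and enqueued.
--     expanded = set(allowed)
--     queue = list(expanded)
--     i = 0
--     while i < len(queue):
--         key = queue[i]
--         i += 1
--         for implied_key in PERMISSION_IMPLICATIONS.get(key, ()):
--             if implied_key not in denied and implied_key not in expanded:
--                 expanded.add(implied_key)
--                 queue.append(implied_key)
--     return expanded - denied
-- ===== Notes on version B (the rewrite author's own statement) =====
-- stated objective: alternative
-- what changed: Replaced the repeat-until-no-change full re-scan of the expanded set with a single-visit FIFO worklist BFS: each key is dequeued once and only newly added implied keys are enqueued.
import Mathlib
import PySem

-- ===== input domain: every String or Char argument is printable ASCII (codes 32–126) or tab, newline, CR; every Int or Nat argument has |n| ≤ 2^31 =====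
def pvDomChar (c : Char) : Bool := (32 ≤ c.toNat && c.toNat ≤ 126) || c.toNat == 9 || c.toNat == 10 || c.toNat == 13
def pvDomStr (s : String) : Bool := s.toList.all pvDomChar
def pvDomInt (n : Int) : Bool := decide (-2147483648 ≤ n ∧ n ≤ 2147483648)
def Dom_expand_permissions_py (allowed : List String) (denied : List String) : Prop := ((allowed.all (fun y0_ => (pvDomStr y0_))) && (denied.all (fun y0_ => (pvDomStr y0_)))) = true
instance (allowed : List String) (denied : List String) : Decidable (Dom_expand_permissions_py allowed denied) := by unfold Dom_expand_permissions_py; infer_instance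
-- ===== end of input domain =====

-- B replaces A's repeat-until-no-change full re-scan with a single-visit FIFO worklist (BFS); same result.

-- ===== PORT A =====
-- module constant PERMISSION_IMPLICATIONS, ported by hand as a lookup if-chain (exact: a literal
-- 3-key dict; its set values are listed in source order — the function's result is a set, which
-- does not depend on that order).
def pvImplications (k : String) : List String :=
  if k = "assets.read" then ["image.view"]
  else if k = "assets.write" then ["image.rate", "image.tag", "image.note.edit", "image.variant.manage"]
  else if k = "image.view" then ["assets.read"]
  else []

-- inner 'for implied_key in implied' body
def pvAddImplied (denied : List String) (st : List String × Bool) (y : String) : List String × Bool :=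
  if y ∈ denied ∨ y ∈ st.1 then st else (PySem.Set.add st.1 y, true)

-- 'for permission_key in list(expanded)' body
def pvPassA (denied : List String) (st : List String × Bool) (x : String) : List String × Bool :=
  (pvImplications x).foldl (pvAddImplied denied) st

-- 'while changed' loop; the fuel 7 is only a totality guard: at most 6 passes can set 'changed'
-- (each adds at least one of the 6 implied keys), proved sufficient by main_lem below.
def pvLoopA (denied : List String) : Nat → PySem.Set String → PySem.Set String
  | 0, E => E
  | f+1, E =>
      let st := E.foldl (pvPassA denied) (E, false)
      if st.2 then pvLoopA denied f st.1 else st.1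

def expand_permissions_py (allowed : List String) (denied : List String) : List String :=
  PySem.Set.diff (pvLoopA denied 7 (PySem.Set.ofList allowed)) denied

-- ===== PORT B =====
-- 'for implied_key in PERMISSION_IMPLICATIONS.get(key, ())' body: add to expanded and enqueue
def pvVisit (denied : List String) (st : List String × List String) (y : String) : List String × List String :=
  if y ∈ denied ∨ y ∈ st.1 then st else (PySem.Set.add st.1 y, st.2 ++ [y])

-- 'while i < len(queue): key = queue[i]; i += 1; …' — the i-indexed FIFO scan is ported as
-- recursion on the unprocessed queue suffix (x :: q), with newly enqueued keys appended to q.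
-- The fuel is only a totality guard (proved sufficient by main_lem below): total keys processed
-- = |set(allowed)| + number of added implied keys ≤ |allowed| + 6.
def pvBfs (denied : List String) : Nat → List String → PySem.Set String → PySem.Set String
  | _, [], E => E
  | 0, _ :: _, E => E
  | f+1, x :: q, E =>
      let st := (pvImplications x).foldl (pvVisit denied) (E, q)
      pvBfs denied f st.2 st.1

def expand_permissions_py_alt (allowed : List String) (denied : List String) : List String :=
  let E := PySem.Set.ofList allowed
  PySem.Set.diff (pvBfs denied (allowed.length + 6) E E) denied

-- ===== PRECONDITION & SPEC =====
def Spec_expand_permissions_py (allowed : List String) (denied : List String) (out : List String) : Prop := out = expand_permissions_py_alt allowed denied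
instance (allowed : List String) (denied : List String) (out : List String) : Decidable (Spec_expand_permissions_py allowed denied out) := by unfold Spec_expand_permissions_py; infer_instance

-- ===== CLAIM (what is proved, stated in full; the proofs are below) =====
def Claim_equal_expand_permissions_py : Prop := ∀ (allowed : List String) (denied : List String), Dom_expand_permissions_py allowed denied → Spec_expand_permissions_py allowed denied (expand_permissions_py allowed denied)

-- ===== LEMMAS AND PROOFS =====

-- all strings that ever occur as implied values of PERMISSION_IMPLICATIONS
def pvU : List String := ["image.view", "assets.read", "image.rate", "image.tag", "image.note.edit", "image.variant.manage"]

-- proof-side view of the inner loop: the expanded list after scanning the implied keys L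
def addAll (denied E L : List String) : List String :=
  L.foldl (fun E y => if y ∈ denied ∨ y ∈ E then E else E ++ [y]) E

-- proof-side view of one pass over the snapshot S
def passAll (denied E S : List String) : List String :=
  S.foldl (fun E x => addAll denied E (pvImplications x)) E

-- how many implied keys are still missing from E
def remU (E : List String) : Nat := (pvU.filter (fun u => decide (u ∉ E))).length

theorem impl_sub_U (x y : String) (h : y ∈ pvImplications x) : y ∈ pvU := by
  unfold pvImplications at h
  split_ifs at h <;> simp_all [pvU]

theorem add_eq_append (E : List String) (y : String) (h : y ∉ E) :
    PySem.Set.add E y = E ++ [y] := by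
  simp [PySem.Set.add, PySem.Set.contains, h]

theorem addAll_cons (denied E : List String) (y : String) (L : List String) :
    addAll denied E (y :: L) = addAll denied (if y ∈ denied ∨ y ∈ E then E else E ++ [y]) L := by
  simp only [addAll, List.foldl_cons]

theorem passAll_cons (denied E : List String) (x : String) (S : List String) :
    passAll denied E (x :: S) = passAll denied (addAll denied E (pvImplications x)) S := rfl

theorem prefix_addAll (L denied : List String) : ∀ E, E <+: addAll denied E L := by
  induction L with
  | nil => intro E; simp [addAll]
  | cons y L ih =>
    intro E
    simp only [addAll, List.foldl_cons]
    by_cases h : y ∈ denied ∨ y ∈ E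
    · simpa [h] using ih E
    · refine List.IsPrefix.trans (List.prefix_append E [y]) ?_
      simpa [h] using ih (E ++ [y])

theorem prefix_passAll (S denied : List String) : ∀ E, E <+: passAll denied E S := by
  induction S with
  | nil => intro E; simp [passAll]
  | cons x S ih =>
    intro E
    simp only [passAll, List.foldl_cons]
    exact List.IsPrefix.trans (prefix_addAll (pvImplications x) denied E) (ih _)

theorem ne_of_proper_prefix {E E1 P : List String} (h1 : E <+: E1) (h2 : E1 <+: P) (hne : E1 ≠ E) : P ≠ E := by
  intro hPE
  have l1 := h1.length_le
  have l2 := h2.length_le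
  rw [hPE] at l2
  exact hne ((h1.eq_of_length (by omega)).symm)

theorem mem_addAll_sub (denied L : List String) : ∀ E y, y ∈ addAll denied E L → y ∈ E ∨ y ∈ L := by
  induction L with
  | nil => intro E y h; simp [addAll] at h; exact Or.inl h
  | cons z L ih =>
    intro E y h
    simp only [addAll, List.foldl_cons] at h
    by_cases hz : z ∈ denied ∨ z ∈ E
    · rw [if_pos hz] at h
      rcases ih E y h with h | h
      · exact Or.inl h
      · exact Or.inr (List.mem_cons_of_mem _ h)
    · rw [if_neg hz] at h
      rcases ih (E ++ [z]) y h with h | h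
      · rcases List.mem_append.1 h with h | h
        · exact Or.inl h
        · simp at h; subst h; exact Or.inr (List.mem_cons_self ..)
      · exact Or.inr (List.mem_cons_of_mem _ h)

theorem mem_passAll_sub (denied S : List String) : ∀ E y, y ∈ passAll denied E S → y ∈ E ∨ y ∈ pvU := by
  induction S with
  | nil => intro E y h; simp [passAll] at h; exact Or.inl h
  | cons x S ih =>
    intro E y h
    simp only [passAll, List.foldl_cons] at h
    rcases ih _ y h with h | h
    · rcases mem_addAll_sub denied _ E y h with h | h
      · exact Or.inl h
      · exact Or.inr (impl_sub_U x y h)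
    · exact Or.inr h

theorem addAll_nodup (denied L : List String) : ∀ E, E.Nodup → (addAll denied E L).Nodup := by
  induction L with
  | nil => intro E h; simpa [addAll] using h
  | cons y L ih =>
    intro E h
    simp only [addAll, List.foldl_cons]
    by_cases hy : y ∈ denied ∨ y ∈ E
    · rw [if_pos hy]; exact ih E h
    · rw [if_neg hy]
      refine ih _ ?_
      have : y ∉ E := fun hm => hy (Or.inr hm)
      simp only [List.nodup_append, h, List.nodup_singleton, true_and]
      rintro a ha b hb rfl
      rcases List.mem_singleton.1 hb
      exact this ha

theorem passAll_nodup (denied S : List String) : ∀ E, E.Nodup → (passAll denied E S).Nodup := by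
  induction S with
  | nil => intro E h; simpa [passAll] using h
  | cons x S ih =>
    intro E h
    simp only [passAll, List.foldl_cons]
    exact ih _ (addAll_nodup denied _ E h)

theorem addAll_eq_of_sat (denied L : List String) : ∀ E, (∀ y ∈ L, y ∈ denied ∨ y ∈ E) → addAll denied E L = E := by
  induction L with
  | nil => intro E _; simp [addAll]
  | cons y L ih =>
    intro E h
    have hy := h y (List.mem_cons_self ..)
    simp only [addAll, List.foldl_cons, if_pos hy]
    exact ih E (fun z hz => h z (List.mem_cons_of_mem _ hz))

theorem addAll_sat (denied L : List String) : ∀ E, ∀ y ∈ L, y ∈ denied ∨ y ∈ addAll denied E L := by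
  induction L with
  | nil => intro E y h; simp at h
  | cons z L ih =>
    intro E y h
    rcases List.mem_cons.1 h with rfl | h
    · by_cases hz : y ∈ denied ∨ y ∈ E
      · rcases hz with hz | hz
        · exact Or.inl hz
        · exact Or.inr ((prefix_addAll _ denied E).subset hz)
      · right
        simp only [addAll, List.foldl_cons, if_neg hz]
        exact ((prefix_addAll L denied (E ++ [y])).subset) (by simp)
    · by_cases hz : z ∈ denied ∨ z ∈ E
      · simpa only [addAll, List.foldl_cons, if_pos hz] using ih E y h
      · simpa only [addAll, List.foldl_cons, if_neg hz] using ih (E ++ [z]) y h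

theorem passAll_sat (denied S : List String) : ∀ E, ∀ x ∈ S, ∀ y ∈ pvImplications x, y ∈ denied ∨ y ∈ passAll denied E S := by
  induction S with
  | nil => intro E x h; simp at h
  | cons x' S ih =>
    intro E x hx y hy
    rcases List.mem_cons.1 hx with rfl | hx
    · rcases addAll_sat denied (pvImplications x) E y hy with h | h
      · exact Or.inl h
      · right
        simp only [passAll, List.foldl_cons]
        exact (prefix_passAll S denied _).subset h
    · simpa only [passAll, List.foldl_cons] using ih _ x hx y hy

theorem passAll_of_sat (denied P : List String) : ∀ E, (∀ x ∈ P, ∀ y ∈ pvImplications x, y ∈ denied ∨ y ∈ E) → passAll denied E P = E := by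
  induction P with
  | nil => intro E _; simp [passAll]
  | cons x P ih =>
    intro E h
    have h1 : addAll denied E (pvImplications x) = E :=
      addAll_eq_of_sat denied _ E (h x (List.mem_cons_self ..))
    simp only [passAll, List.foldl_cons, h1]
    exact ih E (fun z hz => h z (List.mem_cons_of_mem _ hz))

theorem foldlA_eq (denied : List String) (L : List String) : ∀ E ch,
    L.foldl (pvAddImplied denied) (E, ch) =
      (addAll denied E L, ch || decide (addAll denied E L ≠ E)) := by
  induction L with
  | nil => intro E ch; simp [addAll]
  | cons y L ih =>
    intro E ch
    rw [List.foldl_cons, addAll_cons]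
    by_cases h : y ∈ denied ∨ y ∈ E
    · rw [if_pos h]
      have : pvAddImplied denied (E, ch) y = (E, ch) := by simp [pvAddImplied, h]
      rw [this]
      exact ih E ch
    · rw [if_neg h]
      have hy : y ∉ E := fun hm => h (Or.inr hm)
      have : pvAddImplied denied (E, ch) y = (E ++ [y], true) := by
        simp only [pvAddImplied, if_neg h, add_eq_append E y hy]
      rw [this, ih (E ++ [y]) true]
      have hpre : E ++ [y] <+: addAll denied (E ++ [y]) L := prefix_addAll L denied _
      have hne : addAll denied (E ++ [y]) L ≠ E := by
        intro hEq
        have := hpre.length_le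
        rw [hEq] at this
        simp at this
      simp [hne]

theorem foldlB_eq (denied : List String) (L : List String) : ∀ E q,
    ∃ n, addAll denied E L = E ++ n ∧
      L.foldl (pvVisit denied) (E, q) = (E ++ n, q ++ n) := by
  induction L with
  | nil => intro E q; exact ⟨[], by simp [addAll]⟩
  | cons y L ih =>
    intro E q
    rw [List.foldl_cons, addAll_cons]
    by_cases h : y ∈ denied ∨ y ∈ E
    · rw [if_pos h]
      have : pvVisit denied (E, q) y = (E, q) := by simp [pvVisit, h]
      rw [this]
      exact ih E q
    · rw [if_neg h]
      have hy : y ∉ E := fun hm => h (Or.inr hm)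
      have hv : pvVisit denied (E, q) y = (E ++ [y], q ++ [y]) := by
        simp only [pvVisit, if_neg h, add_eq_append E y hy]
      rw [hv]
      obtain ⟨n, hn1, hn2⟩ := ih (E ++ [y]) (q ++ [y])
      exact ⟨y :: n, by simpa using hn1, by simpa using hn2⟩

theorem passA_eq (denied : List String) (S : List String) : ∀ E ch,
    S.foldl (pvPassA denied) (E, ch) =
      (passAll denied E S, ch || decide (passAll denied E S ≠ E)) := by
  induction S with
  | nil => intro E ch; simp [passAll]
  | cons x S ih =>
    intro E ch
    rw [List.foldl_cons, passAll_cons]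
    have hstep : pvPassA denied (E, ch) x =
        (addAll denied E (pvImplications x), ch || decide (addAll denied E (pvImplications x) ≠ E)) :=
      foldlA_eq denied _ E ch
    rw [hstep, ih]
    set E1 := addAll denied E (pvImplications x) with hE1
    set P := passAll denied E1 S with hP
    have hpre1 : E <+: E1 := prefix_addAll _ denied E
    have hpre2 : E1 <+: P := prefix_passAll S denied E1
    by_cases he : E1 = E
    · rw [he]; simp
    · have hPne : P ≠ E := ne_of_proper_prefix hpre1 hpre2 he
      simp [he, hPne]

theorem remU_drop (n E : List String) (hn : n.Nodup) (hU : ∀ y ∈ n, y ∈ pvU)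
    (hE : ∀ y ∈ n, y ∉ E) : remU (E ++ n) + n.length ≤ remU E := by
  unfold remU
  have hUnd : pvU.Nodup := by decide
  set V := pvU.filter (fun u => decide (u ∉ E)) with hV
  have hVnd : V.Nodup := hUnd.filter _
  have hsub : ∀ y ∈ n, y ∈ V := fun y hy => List.mem_filter.2 ⟨hU y hy, by simpa using hE y hy⟩
  have hsplit : pvU.filter (fun u => decide (u ∉ E ++ n)) = V.filter (fun u => decide (u ∉ n)) := by
    rw [hV, List.filter_filter]
    apply List.filter_congr
    intro u _
    simp [List.mem_append]
    exact Bool.and_comm _ _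
  rw [hsplit]
  have hpred : (fun u : String => decide (u ∉ n)) = fun u => !decide (u ∈ n) := by
    funext u; simp
  rw [hpred]
  have h1 : ∀ (W : List String), (W.filter (fun u => !decide (u ∈ n))).length + (W.filter (fun u => decide (u ∈ n))).length = W.length := by
    intro W
    induction W with
    | nil => simp
    | cons v W ih => by_cases hv : v ∈ n <;> simp [hv] <;> omega
  have h2 : n.length ≤ (V.filter (fun u => decide (u ∈ n))).length := by
    have hsp : List.Subperm n (V.filter (fun u => decide (u ∈ n))) :=
      hn.subperm (fun y hy => List.mem_filter.2 ⟨hsub y hy, by simpa using hy⟩)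
    exact hsp.length_le
  have := h1 V
  omega

theorem bfs_level (denied : List String) (q : List String) : ∀ (f : Nat) (E pend : List String),
    ∃ n, passAll denied E q = E ++ n ∧
      pvBfs denied (f + q.length) (q ++ pend) E = pvBfs denied f (pend ++ n) (E ++ n) := by
  induction q with
  | nil => intro f E pend; exact ⟨[], by simp [passAll]⟩
  | cons x q ih =>
    intro f E pend
    obtain ⟨n1, hn1, hfold⟩ := foldlB_eq denied (pvImplications x) E (q ++ pend)
    have hstep : pvBfs denied (f + (x :: q).length) ((x :: q) ++ pend) E =
        pvBfs denied (f + q.length) (q ++ (pend ++ n1)) (E ++ n1) := by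
      show pvBfs denied ((f + q.length) + 1) (x :: (q ++ pend)) E = _
      simp only [pvBfs, hfold]
      rw [List.append_assoc]
    obtain ⟨n2, hn2, hrec⟩ := ih f (E ++ n1) (pend ++ n1)
    refine ⟨n1 ++ n2, ?_, ?_⟩
    · rw [passAll_cons, hn1, hn2, List.append_assoc]
    · rw [hstep, hrec, List.append_assoc, List.append_assoc]

-- A's fixpoint loop and B's worklist compute the same list: E is the current expanded list,
-- split as P (already saturated keys) ++ q (B's pending queue).
theorem main_lem (denied : List String) : ∀ (k : Nat) (E P q : List String) (f : Nat),
    E = P ++ q → E.Nodup →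
    (∀ x ∈ P, ∀ y ∈ pvImplications x, y ∈ denied ∨ y ∈ E) →
    remU E + 1 ≤ k → q.length + remU E ≤ f →
    pvLoopA denied k E = pvBfs denied f q E := by
  intro k
  induction k with
  | zero => intro E P q f _ _ _ hk _; omega
  | succ k ih =>
    intro E P q f hEPQ hnd hsat hk hf
    have hP : passAll denied E P = E := passAll_of_sat denied P E hsat
    have h1 : passAll denied E (P ++ q) = passAll denied E q := by
      rw [passAll, List.foldl_append]
      show passAll denied (passAll denied E P) q = _
      rw [hP]
    have hpassE : passAll denied E E = passAll denied E q := by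
      nth_rewrite 2 [hEPQ]
      exact h1
    have hqf : q.length ≤ f := by omega
    obtain ⟨n, hn, hbfs⟩ := bfs_level denied q (f - q.length) E []
    rw [List.nil_append] at hbfs
    rw [Nat.sub_add_cancel hqf, List.append_nil] at hbfs
    have hA : pvLoopA denied (k+1) E =
        (if decide (passAll denied E E ≠ E) then pvLoopA denied k (passAll denied E E) else passAll denied E E) := by
      show (let st := E.foldl (pvPassA denied) (E, false); if st.2 then pvLoopA denied k st.1 else st.1) = _
      rw [passA_eq denied E E false]
      simp
    rw [hpassE, hn] at hA
    by_cases hcase : n = []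
    · subst hcase
      rw [List.append_nil] at hA hn
      simp at hA
      rw [hA, hbfs]
      simp [pvBfs]
    · have hne : E ++ n ≠ E := by
        intro hEq
        have := congrArg List.length hEq
        simp at this
        exact hcase (by simpa using this)
      rw [if_pos (by simpa using hne)] at hA
      have hndE : (E ++ n).Nodup := by
        rw [← hn]; exact passAll_nodup denied q E hnd
      have hdisj : ∀ y ∈ n, y ∉ E := by
        intro y hy hyE
        rcases List.nodup_append.1 hndE with ⟨_, _, hd⟩
        exact hd y hyE y hy rfl
      have hnnd : n.Nodup := (List.nodup_append.1 hndE).2.1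
      have hnU : ∀ y ∈ n, y ∈ pvU := by
        intro y hy
        have : y ∈ passAll denied E q := by rw [hn]; exact List.mem_append_right E hy
        rcases mem_passAll_sub denied q E y this with h | h
        · exact absurd h (hdisj y hy)
        · exact h
      have hrem := remU_drop n E hnnd hnU hdisj
      have hnlen : 1 ≤ n.length := by
        cases n with
        | nil => exact absurd rfl hcase
        | cons _ _ => simp
      rw [hA, hbfs]
      refine ih (E ++ n) E n (f - q.length) rfl hndE ?_ (by omega) (by omega)
      intro x hx y hy
      have hxE : x ∈ P ++ q := hEPQ ▸ hx
      rcases List.mem_append.1 hxE with hxP | hxq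
      · rcases hsat x hxP y hy with h | h
        · exact Or.inl h
        · exact Or.inr (List.mem_append_left n h)
      · have := passAll_sat denied q E x hxq y hy
        rw [hn] at this
        exact this

-- ===== VERDICT (by name: the statement is the Claim_ definition above) =====
theorem expand_permissions_py_spec : Claim_equal_expand_permissions_py := by
  unfold Claim_equal_expand_permissions_py
  intro allowed denied _
  unfold Spec_expand_permissions_py expand_permissions_py expand_permissions_py_alt
  have hrem : remU (PySem.Set.ofList allowed) ≤ 6 := by
    have h6 : pvU.length = 6 := by decide
    have := List.length_filter_le (fun u => decide (u ∉ PySem.Set.ofList allowed)) pvU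
    unfold remU
    omega
  have hlen : (PySem.Set.ofList allowed).length ≤ allowed.length :=
    PySem.Set.length_ofList_le allowed
  have := main_lem denied 7 (PySem.Set.ofList allowed) [] (PySem.Set.ofList allowed)
    (allowed.length + 6) (by simp) (PySem.Set.nodup_ofList allowed)
    (by intro x hx; simp at hx) (by omega) (by omega)
  rw [this]
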